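-- pv_equiv track=rewrite | github.com/guilhermesantos0/PyJa-Cross | main.py | updateSelected
-- ===== SOURCE A (Python) =====
-- selectedDirection = "row"
--
-- words = [
--     { "word": "pygame", "direction": "row" },
--     { "word": "joptionpane", "direction": "column"}
-- ]
--
-- blocks = [
--     [{ "enabled": False, "letter": "" , "written": "", "words": None },{ "enabled": False, "letter": "" , "written": "", "words": None },{ "enabled": False, "letter": "" , "written": "", "words": None },{ "enabled": True, "letter": "j", "written": "", "words": [1] },{ "enabled": False, "letter": "" , "written": "", "words": None },{ "enabled": False, "letter": "" , "written": "", "words": None },{ "enabled": False, "letter": "" , "written": "", "words": None },{ "enabled": False, "letter": "" , "written": "", "words": None },{ "enabled": False, "letter": "" , "written": "", "words": None },{ "enabled": False, "letter": "" , "written": "", "words": None },{ "enabled": False, "letter": "" , "written": "", "words": None },],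
--     [{ "enabled": False, "letter": "" , "written": "", "words": None },{ "enabled": False, "letter": "" , "written": "", "words": None },{ "enabled": False, "letter": "" , "written": "", "words": None },{ "enabled": True, "letter": "o", "written": "", "words": [1] },{ "enabled": False, "letter": "" , "written": "", "words": None },{ "enabled": False, "letter": "" , "written": "", "words": None },{ "enabled": False, "letter": "" , "written": "", "words": None },{ "enabled": False, "letter": "" , "written": "", "words": None },{ "enabled": False, "letter": "" , "written": "", "words": None },{ "enabled": False, "letter": "" , "written": "", "words": None },{ "enabled": False, "letter": "" , "written": "", "words": None },],
--     [{ "enabled": False, "letter": "" , "written": "", "words": None },{ "enabled": False, "letter": "" , "written": "", "words": None },{ "enabled": False, "letter": "" , "written": "", "words": None },{ "enabled": True, "letter": "p", "written": "", "words": [1] },{ "enabled": False, "letter": "" , "written": "", "words": None },{ "enabled": False, "letter": "" , "written": "", "words": None },{ "enabled": False, "letter": "" , "written": "", "words": None },{ "enabled": False, "letter": "" , "written": "", "words": None },{ "enabled": False, "letter": "" , "written": "", "words": None },{ "enabled": False, "letter": "" , "written": "", "words": None },{ "enabled": False, "letter": "" , "written": "", "words": None },],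
--     [{ "enabled": False, "letter": "" , "written": "", "words": None },{ "enabled": False, "letter": "" , "written": "", "words": None },{ "enabled": False, "letter": "" , "written": "", "words": None },{ "enabled": True, "letter": "t", "written": "", "words": [1] },{ "enabled": False, "letter": "" , "written": "", "words": None },{ "enabled": False, "letter": "" , "written": "", "words": None },{ "enabled": False, "letter": "" , "written": "", "words": None },{ "enabled": False, "letter": "" , "written": "", "words": None },{ "enabled": False, "letter": "" , "written": "", "words": None },{ "enabled": False, "letter": "" , "written": "", "words": None },{ "enabled": False, "letter": "" , "written": "", "words": None },],
--     [{ "enabled": False, "letter": "" , "written": "", "words": None },{ "enabled": False, "letter": "" , "written": "", "words": None },{ "enabled": False, "letter": "" , "written": "", "words": None },{ "enabled": True, "letter": "i", "written": "", "words": [1] },{ "enabled": False, "letter": "" , "written": "", "words": None },{ "enabled": False, "letter": "" , "written": "", "words": None },{ "enabled": False, "letter": "" , "written": "", "words": None },{ "enabled": False, "letter": "" , "written": "", "words": None },{ "enabled": False, "letter": "" , "written": "", "words": None },{ "enabled": False, "letter": "" , "written": "", "words": None },{ "enabled": False, "letter": "" , "written": "", "words": None },],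
--     [{ "enabled": False, "letter": "" , "written": "", "words": None },{ "enabled": False, "letter": "" , "written": "", "words": None },{ "enabled": False, "letter": "" , "written": "", "words": None },{ "enabled": True, "letter": "o", "written": "", "words": [1] },{ "enabled": False, "letter": "" , "written": "", "words": None },{ "enabled": False, "letter": "" , "written": "", "words": None },{ "enabled": False, "letter": "" , "written": "", "words": None },{ "enabled": False, "letter": "" , "written": "", "words": None },{ "enabled": False, "letter": "" , "written": "", "words": None },{ "enabled": False, "letter": "" , "written": "", "words": None },{ "enabled": False, "letter": "" , "written": "", "words": None },],
--     [{ "enabled": False, "letter": "" , "written": "", "words": None },{ "enabled": False, "letter": "" , "written": "", "words": None },{ "enabled": False, "letter": "" , "written": "", "words": None },{ "enabled": True, "letter": "n", "written": "", "words": [1] },{ "enabled": False, "letter": "" , "written": "", "words": None },{ "enabled": False, "letter": "" , "written": "", "words": None },{ "enabled": False, "letter": "" , "written": "", "words": None },{ "enabled": False, "letter": "" , "written": "", "words": None },{ "enabled": False, "letter": "" , "written": "", "words": None },{ "enabled": False, "letter": "" , "written": "", "words": None },{ "enabled": False, "letter": "" , "written": "", "words": None },],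
--     [{ "enabled": False, "letter": "" , "written": "", "words": None },{ "enabled": False, "letter": "" , "written": "", "words": None },{ "enabled": False, "letter": "" , "written": "", "words": None },{ "enabled": True, "letter": "p", "written": "", "words": [1] },{ "enabled": False, "letter": "" , "written": "", "words": None },{ "enabled": False, "letter": "" , "written": "", "words": None },{ "enabled": False, "letter": "" , "written": "", "words": None },{ "enabled": False, "letter": "" , "written": "", "words": None },{ "enabled": False, "letter": "" , "written": "", "words": None },{ "enabled": False, "letter": "" , "written": "", "words": None },{ "enabled": False, "letter": "" , "written": "", "words": None },],
--     [{ "enabled": True, "letter": "p", "written": "P", "words": [0] },{ "enabled": True, "letter": "y", "written": "Y" , "words": [0]},{ "enabled": True, "letter": "g", "written": "", "words": [0] },{ "enabled": True, "letter": "a", "written": "", "words": [0, 1] },{ "enabled": True, "letter": "m", "written": "", "words": [0] },{ "enabled": True, "letter": "e", "written": "", "words": [0] },{ "enabled": False, "letter": "" , "written": "", "words": None },{ "enabled": False, "letter": "" , "written": "", "words": None },{ "enabled": False, "letter": "" , "written": "", "words": None },{ "enabled": False, "letter": "" , "written": "", "words": None },{ "enabled": False, "letter": "" , "written": "", "words":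 None },],
--     [{ "enabled": False, "letter": "" , "written": "", "words": None },{ "enabled": False, "letter": "" , "written": "", "words": None },{ "enabled": False, "letter": "" , "written": "", "words": None },{ "enabled": True, "letter": "n", "written": "", "words": [1] },{ "enabled": False, "letter": "" , "written": "", "words": None },{ "enabled": False, "letter": "" , "written": "", "words": None },{ "enabled": False, "letter": "" , "written": "", "words": None },{ "enabled": False, "letter": "" , "written": "", "words": None },{ "enabled": False, "letter": "" , "written": "", "words": None },{ "enabled": False, "letter": "" , "written": "", "words": None },{ "enabled": False, "letter": "" , "written": "", "words": None },],
--     [{ "enabled": False, "letter": "" , "written": "", "words": None },{ "enabled": False, "letter": "" , "written": "", "words": None },{ "enabled": False, "letter": "" , "written": "", "words": None },{ "enabled": True, "letter": "e", "written": "", "words": [1] },{ "enabled": False, "letter": "" , "written": "", "words": None },{ "enabled": False, "letter": "" , "written": "", "words": None },{ "enabled": False, "letter": "" , "written": "", "words": None },{ "enabled": False, "letter": "" , "written": "", "words": None },{ "enabled": False, "letter": "" , "written": "", "words": None },{ "enabled": False, "letter": "" , "written": "", "words": None },{ "enabled": False, "letter": "" , "written": "", "words": None },]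
-- ]
--
-- def updateSelected(selected, direction):
--
--     x,y = selected
--
--     _selectedDirection = selectedDirection
--
--     if direction == "down":
--
--         i = y
--         while True:
--             if i == len(blocks) - 1:
--                 i = 0
--             else:
--                 i += 1
--
--             if blocks[i][x]["enabled"]:
--                 y = i
--
--                 _selectedDirection = words[blocks[i][x]["words"][0]]["direction"]
--
--                 break
--
--     elif direction == "up":
--         i = y
--         while True:
--             if i == 0:
--                 i = len(blocks) - 1
--             else:
--                 i -= 1
--
--             if blocks[i][x]["enabled"]:
--                 y = i
--
--                 _selectedDirection = words[blocks[i][x]["words"][0]]["direction"]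
--
--                 break
--
--     elif direction == "right":
--         i = x
--         while True:
--             if i == len(blocks[y]) - 1:
--                 i = 0
--             else:
--                 i += 1
--
--             if blocks[y][i]["enabled"]:
--                 x = i
--
--                 _selectedDirection = words[blocks[y][i]["words"][0]]["direction"]
--
--                 break
--
--     elif direction == "left":
--         i = x
--         while True:
--             if i == 0 :
--                 i = len(blocks[y]) - 1
--             else:
--                 i -= 1
--
--             if blocks[y][i]["enabled"]:
--                 x = i
--
--                 _selectedDirection = words[blocks[y][i]["words"][0]]["direction"]
--
--                 break
--
--     return (x,y), _selectedDirection
-- ===== SOURCE B (Python) =====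
-- selectedDirection = "row"
--
-- words = [
--     { "word": "pygame", "direction": "row" },
--     { "word": "joptionpane", "direction": "column"}
-- ]
--
-- blocks = [
--     [{ "enabled": False, "letter": "" , "written": "", "words": None },{ "enabled": False, "letter": "" , "written": "", "words": None },{ "enabled": False, "letter": "" , "written": "", "words": None },{ "enabled": True, "letter": "j", "written": "", "words": [1] },{ "enabled": False, "letter": "" , "written": "", "words": None },{ "enabled": False, "letter": "" , "written": "", "words": None },{ "enabled": False, "letter": "" , "written": "", "words": None },{ "enabled": False, "letter": "" , "written": "", "words": None },{ "enabled": False, "letter": "" , "written": "", "words": None },{ "enabled": False, "letter": "" , "written": "", "words": None },{ "enabled": False, "letter": "" , "written": "", "words": None },],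
--     [{ "enabled": False, "letter": "" , "written": "", "words": None },{ "enabled": False, "letter": "" , "written": "", "words": None },{ "enabled": False, "letter": "" , "written": "", "words": None },{ "enabled": True, "letter": "o", "written": "", "words": [1] },{ "enabled": False, "letter": "" , "written": "", "words": None },{ "enabled": False, "letter": "" , "written": "", "words": None },{ "enabled": False, "letter": "" , "written": "", "words": None },{ "enabled": False, "letter": "" , "written": "", "words": None },{ "enabled": False, "letter": "" , "written": "", "words": None },{ "enabled": False, "letter": "" , "written": "", "words": None },{ "enabled": False, "letter": "" , "written": "", "words": None },],
--     [{ "enabled": False, "letter": "" , "written": "", "words": None },{ "enabled": False, "letter": "" , "written": "", "words": None },{ "enabled": False, "letter": "" , "written": "", "words": None },{ "enabled": True, "letter": "p", "written": "", "words": [1] },{ "enabled": False, "letter": "" , "written": "", "words": None },{ "enabled": False, "letter": "" , "written": "", "words": None },{ "enabled": False, "letter": "" , "written": "", "words": None },{ "enabled": False, "letter": "" , "written": "", "words": None },{ "enabled": False, "letter": "" , "written": "", "words": None },{ "enabled": False, "letter": "" , "written": "", "words": None },{ "enabled": False, "letter": "" , "written": "", "words": None },],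
--     [{ "enabled": False, "letter": "" , "written": "", "words": None },{ "enabled": False, "letter": "" , "written": "", "words": None },{ "enabled": False, "letter": "" , "written": "", "words": None },{ "enabled": True, "letter": "t", "written": "", "words": [1] },{ "enabled": False, "letter": "" , "written": "", "words": None },{ "enabled": False, "letter": "" , "written": "", "words": None },{ "enabled": False, "letter": "" , "written": "", "words": None },{ "enabled": False, "letter": "" , "written": "", "words": None },{ "enabled": False, "letter": "" , "written": "", "words": None },{ "enabled": False, "letter": "" , "written": "", "words": None },{ "enabled": False, "letter": "" , "written": "", "words": None },],
--     [{ "enabled": False, "letter": "" , "written": "", "words": None },{ "enabled": False, "letter": "" , "written": "", "words": None },{ "enabled": False, "letter": "" , "written": "", "words": None },{ "enabled": True, "letter": "i", "written": "", "words": [1] },{ "enabled": False, "letter": "" , "written": "", "words": None },{ "enabled": False, "letter": "" , "written": "", "words": None },{ "enabled": False, "letter": "" , "written": "", "words": None },{ "enabled": False, "letter": "" , "written": "", "words": None },{ "enabled": False, "letter": "" , "written": "", "words": None },{ "enabled": False, "letter": "" , "written": "", "words": None },{ "enabled": False, "letter": "" , "written": "", "words": None },],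
--     [{ "enabled": False, "letter": "" , "written": "", "words": None },{ "enabled": False, "letter": "" , "written": "", "words": None },{ "enabled": False, "letter": "" , "written": "", "words": None },{ "enabled": True, "letter": "o", "written": "", "words": [1] },{ "enabled": False, "letter": "" , "written": "", "words": None },{ "enabled": False, "letter": "" , "written": "", "words": None },{ "enabled": False, "letter": "" , "written": "", "words": None },{ "enabled": False, "letter": "" , "written": "", "words": None },{ "enabled": False, "letter": "" , "written": "", "words": None },{ "enabled": False, "letter": "" , "written": "", "words": None },{ "enabled": False, "letter": "" , "written": "", "words": None },],
--     [{ "enabled": False, "letter": "" , "written": "", "words": None },{ "enabled": False, "letter": "" , "written": "", "words": None },{ "enabled": False, "letter": "" , "written": "", "words": None },{ "enabled": True, "letter": "n", "written": "", "words": [1] },{ "enabled": False, "letter": "" , "written": "", "words": None },{ "enabled": False, "letter": "" , "written": "", "words": None },{ "enabled": False, "letter": "" , "written": "", "words": None },{ "enabled": False, "letter": "" , "written": "", "words": None },{ "enabled": False, "letter": "" , "written": "", "words": None },{ "enabled": False, "letter": "" , "written": "", "words": None },{ "enabled": False, "letter": "" , "written": "", "words": None },],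
--     [{ "enabled": False, "letter": "" , "written": "", "words": None },{ "enabled": False, "letter": "" , "written": "", "words": None },{ "enabled": False, "letter": "" , "written": "", "words": None },{ "enabled": True, "letter": "p", "written": "", "words": [1] },{ "enabled": False, "letter": "" , "written": "", "words": None },{ "enabled": False, "letter": "" , "written": "", "words": None },{ "enabled": False, "letter": "" , "written": "", "words": None },{ "enabled": False, "letter": "" , "written": "", "words": None },{ "enabled": False, "letter": "" , "written": "", "words": None },{ "enabled": False, "letter": "" , "written": "", "words": None },{ "enabled": False, "letter": "" , "written": "", "words": None },],
--     [{ "enabled": True, "letter": "p", "written": "P", "words": [0] },{ "enabled": True, "letter": "y", "written": "Y" , "words": [0]},{ "enabled": True, "letter": "g", "written": "", "words": [0] },{ "enabled": True, "letter": "a", "written": "", "words": [0, 1] },{ "enabled": True, "letter": "m", "written": "", "words": [0] },{ "enabled": True, "letter": "e", "written": "", "words": [0] },{ "enabled": False, "letter": "" , "written": "", "words": None },{ "enabled": False, "letter": "" , "written": "", "words": None },{ "enabled": False, "letter": "" , "written": "", "words": None },{ "enabled": False, "letter": "" , "written": "", "words": None },{ "enabled": False, "letter": "" , "written": "", "words":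 None },],
--     [{ "enabled": False, "letter": "" , "written": "", "words": None },{ "enabled": False, "letter": "" , "written": "", "words": None },{ "enabled": False, "letter": "" , "written": "", "words": None },{ "enabled": True, "letter": "n", "written": "", "words": [1] },{ "enabled": False, "letter": "" , "written": "", "words": None },{ "enabled": False, "letter": "" , "written": "", "words": None },{ "enabled": False, "letter": "" , "written": "", "words": None },{ "enabled": False, "letter": "" , "written": "", "words": None },{ "enabled": False, "letter": "" , "written": "", "words": None },{ "enabled": False, "letter": "" , "written": "", "words": None },{ "enabled": False, "letter": "" , "written": "", "words": None },],
--     [{ "enabled": False, "letter": "" , "written": "", "words": None },{ "enabled": False, "letter": "" , "written": "", "words": None },{ "enabled": False, "letter": "" , "written": "", "words": None },{ "enabled": True, "letter": "e", "written": "", "words": [1] },{ "enabled": False, "letter": "" , "written": "", "words": None },{ "enabled": False, "letter": "" , "written": "", "words": None },{ "enabled": False, "letter": "" , "written": "", "words": None },{ "enabled": False, "letter": "" , "written": "", "words": None },{ "enabled": False, "letter": "" , "written": "", "words": None },{ "enabled": False, "letter": "" , "written": "", "words": None },{ "enabled": False, "letter": "" , "written": "", "words": None },]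
-- ]
--
-- def updateSelected(selected, direction):
--     x, y = selected
--     sel = selectedDirection
--     if direction in ("down", "up"):
--         cells = [row[x] for row in blocks]
--         start = y
--     elif direction in ("right", "left"):
--         cells = blocks[y]
--         start = x
--     else:
--         return (x, y), sel
--     enabled = [i for i, c in enumerate(cells) if c["enabled"]]
--     if direction in ("down", "right"):
--         after = [j for j in enabled if j > start]
--         i = min(after) if after else min(enabled)
--     else:
--         before = [j for j in enabled if j < start]
--         i = max(before) if before else max(enabled)
--     sel = words[cells[i]["words"][0]]["direction"]
--     if direction in ("down", "up"):
--         y = i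
--     else:
--         x = i
--     return (x, y), sel
-- ===== Notes on version B (the rewrite author's own statement) =====
-- stated objective: simpler
-- what changed: Replaces A's four duplicated cyclic wraparound while-loops by an order-based lookup: collect the enabled indices of the relevant row/column once, then take min(indices after start) (falling back to min of all for wraparound) for down/right, and symmetrically max for up/left, so no step-by-step cyclic scan remains.
-- outside the precondition, e.g. on updateSelected((3, -5), 'down'): A returns ((3, -4), 'column'), B returns ((3, 0), 'column'); on updateSelected((3, 20), 'down'): A raises IndexError, B returns ((3, 0), 'column'); on updateSelected((6, 0), 'down'): A does not finish within the time limit, B raises ValueError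
import Mathlib
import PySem

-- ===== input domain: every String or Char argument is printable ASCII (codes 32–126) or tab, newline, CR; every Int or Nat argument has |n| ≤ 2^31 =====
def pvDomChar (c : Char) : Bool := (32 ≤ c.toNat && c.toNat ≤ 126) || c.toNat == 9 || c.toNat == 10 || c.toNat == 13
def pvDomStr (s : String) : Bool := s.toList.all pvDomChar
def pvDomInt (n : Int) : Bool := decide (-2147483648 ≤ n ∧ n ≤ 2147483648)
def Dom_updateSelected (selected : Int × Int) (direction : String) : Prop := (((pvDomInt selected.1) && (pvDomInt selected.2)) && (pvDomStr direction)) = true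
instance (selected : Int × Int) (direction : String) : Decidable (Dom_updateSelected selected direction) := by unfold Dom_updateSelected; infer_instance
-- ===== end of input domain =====

-- B replaces A's four cyclic wraparound while-loops by an order-based lookup: it collects the
-- enabled indices of the relevant row/column once and takes the min index after (or max index
-- before) the start, falling back to the overall min/max for wraparound (objective: simpler).
-- Return-value equivalence only; no mutation.

-- ===== PORT A =====
-- shared module constants: a cell is (enabled, words or [] for None); words keeps (word, direction)
def pyjaWords : List (String × String) := [("pygame", "row"), ("joptionpane", "column")]

def pyjaF : Bool × List Int := (false, [])

def pyjaRowN : List (Bool × List Int) :=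
  [pyjaF, pyjaF, pyjaF, (true, [1]), pyjaF, pyjaF, pyjaF, pyjaF, pyjaF, pyjaF, pyjaF]

def pyjaRow8 : List (Bool × List Int) :=
  [(true, [0]), (true, [0]), (true, [0]), (true, [0, 1]), (true, [0]), (true, [0]),
   pyjaF, pyjaF, pyjaF, pyjaF, pyjaF]

def pyjaBlocks : List (List (Bool × List Int)) :=
  [pyjaRowN, pyjaRowN, pyjaRowN, pyjaRowN, pyjaRowN, pyjaRowN, pyjaRowN, pyjaRowN,
   pyjaRow8, pyjaRowN, pyjaRowN]

-- words[cell["words"][0]]["direction"]  (none = IndexError)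
def pyjaDirOf (cell : Bool × List Int) : Option String :=
  match PySem.List.pyGet? cell.2 0 with
  | none => none
  | some w =>
    match PySem.List.pyGet? pyjaWords w with
    | none => none
    | some p => some p.2

-- A's 'down' while-loop; none = IndexError or fuel out (unreachable inside Pre_)
def pyjaLoopDown (x : Int) (i : Int) : Nat → Option (Int × String)
  | 0 => none
  | Nat.succ fuel =>
    let i := if i = (pyjaBlocks.length : Int) - 1 then 0 else i + 1
    match PySem.List.pyGet? pyjaBlocks i with
    | none => none
    | some row =>
      match PySem.List.pyGet? row x with
      | none => none
      | some cell =>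
        if cell.1 then
          match pyjaDirOf cell with
          | none => none
          | some d => some (i, d)
        else pyjaLoopDown x i fuel

def pyjaLoopUp (x : Int) (i : Int) : Nat → Option (Int × String)
  | 0 => none
  | Nat.succ fuel =>
    let i := if i = 0 then (pyjaBlocks.length : Int) - 1 else i - 1
    match PySem.List.pyGet? pyjaBlocks i with
    | none => none
    | some row =>
      match PySem.List.pyGet? row x with
      | none => none
      | some cell =>
        if cell.1 then
          match pyjaDirOf cell with
          | none => none
          | some d => some (i, d)
        else pyjaLoopUp x i fuel

def pyjaLoopRight (y : Int) (i : Int) : Nat → Option (Int × String)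
  | 0 => none
  | Nat.succ fuel =>
    match PySem.List.pyGet? pyjaBlocks y with
    | none => none
    | some row =>
      let i := if i = (row.length : Int) - 1 then 0 else i + 1
      match PySem.List.pyGet? row i with
      | none => none
      | some cell =>
        if cell.1 then
          match pyjaDirOf cell with
          | none => none
          | some d => some (i, d)
        else pyjaLoopRight y i fuel

def pyjaLoopLeft (y : Int) (i : Int) : Nat → Option (Int × String)
  | 0 => none
  | Nat.succ fuel =>
    match PySem.List.pyGet? pyjaBlocks y with
    | none => none
    | some row =>
      let i := if i = 0 then (row.length : Int) - 1 else i - 1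
      match PySem.List.pyGet? row i with
      | none => none
      | some cell =>
        if cell.1 then
          match pyjaDirOf cell with
          | none => none
          | some d => some (i, d)
        else pyjaLoopLeft y i fuel

def updateSelected (selected : Int × Int) (direction : String) : (Int × Int) × String :=
  let x := selected.1
  let y := selected.2
  let sel := "row"       -- module global selectedDirection
  if direction = "down" then
    match pyjaLoopDown x y 12 with
    | some (i, d) => ((x, i), d)
    | none => ((x, y), sel)
  else if direction = "up" then
    match pyjaLoopUp x y 12 with
    | some (i, d) => ((x, i), d)
    | none => ((x, y), sel)
  else if direction = "right" then
    match pyjaLoopRight y x 12 with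
    | some (i, d) => ((i, y), d)
    | none => ((x, y), sel)
  else if direction = "left" then
    match pyjaLoopLeft y x 12 with
    | some (i, d) => ((i, y), d)
    | none => ((x, y), sel)
  else ((x, y), sel)

-- ===== PORT B =====
-- B's result, given cells (the scanned row/column) and start; none = Python exception (outside Pre_)
def pyjaPick (cells : List (Bool × List Int)) (start : Int) (forward : Bool) : Option Int :=
  let enabled : List Int :=
    (PySem.List.enumerate cells 0).filterMap (fun p => if p.2.1 then some p.1 else none)
  if forward then
    let after := enabled.filter (fun j => decide (j > start))
    if after.isEmpty then PySem.List.min? enabled (fun j => j)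
    else PySem.List.min? after (fun j => j)
  else
    let before := enabled.filter (fun j => decide (j < start))
    if before.isEmpty then PySem.List.max? enabled (fun j => j)
    else PySem.List.max? before (fun j => j)

def updateSelected_alt (selected : Int × Int) (direction : String) : (Int × Int) × String :=
  let x := selected.1
  let y := selected.2
  let vertical := direction = "down" ∨ direction = "up"
  let horizontal := direction = "right" ∨ direction = "left"
  if vertical ∨ horizontal then
    let cellsOpt : Option (List (Bool × List Int)) :=
      if vertical then pyjaBlocks.mapM (fun row => PySem.List.pyGet? row x)
      else PySem.List.pyGet? pyjaBlocks y
    match cellsOpt with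
    | none => ((x, y), "row")          -- Python B raises IndexError here (outside Pre_)
    | some cells =>
      let start := if vertical then y else x
      let forward := direction = "down" ∨ direction = "right"
      match pyjaPick cells start forward with
      | none => ((x, y), "row")        -- Python B raises ValueError here (outside Pre_)
      | some i =>
        match (PySem.List.pyGet? cells i).bind pyjaDirOf with
        | none => ((x, y), "row")      -- IndexError in Python B (outside Pre_)
        | some d => if vertical then ((x, i), d) else ((i, y), d)
  else ((x, y), "row")

-- ===== PRECONDITION & SPEC =====
-- Pre_ restricts the four movement directions to in-grid coordinates with a reachable enabled cell:
-- outside it A raises IndexError, loops forever (up/down in columns 6–10, which hold no enabled cell),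
-- or returns unnormalized negative coordinates via Python's negative-index wraparound — a corner
-- outside the grid's natural domain, where my B instead returns the normalized index or raises.
def Pre_updateSelected (selected : Int × Int) (direction : String) : Prop :=
  (direction = "down" ∨ direction = "up" ∨ direction = "right" ∨ direction = "left") →
    (0 ≤ selected.1 ∧ selected.1 ≤ 10 ∧ 0 ≤ selected.2 ∧ selected.2 ≤ 10 ∧
      ((direction = "down" ∨ direction = "up") → selected.1 ≤ 5))
instance (selected : Int × Int) (direction : String) : Decidable (Pre_updateSelected selected direction) := by
  unfold Pre_updateSelected; infer_instance

def pvWitness_updateSelected : (Int × Int) × String := ((3, 5), "down")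

def Spec_updateSelected (selected : Int × Int) (direction : String) (out : (Int × Int) × String) : Prop := out = updateSelected_alt selected direction
instance (selected : Int × Int) (direction : String) (out : (Int × Int) × String) : Decidable (Spec_updateSelected selected direction out) := by unfold Spec_updateSelected; infer_instance

-- ===== CLAIM (what is proved, stated in full; the proofs are below) =====
def Claim_equal_updateSelected : Prop := ∀ (selected : Int × Int) (direction : String), Dom_updateSelected selected direction → Pre_updateSelected selected direction → Spec_updateSelected selected direction (updateSelected selected direction)

-- ===== LEMMAS AND PROOFS =====
theorem pyja_key_down : ∀ a : Nat, a < 6 → ∀ b : Nat, b < 11 →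
    updateSelected ((a : Int), (b : Int)) "down" = updateSelected_alt ((a : Int), (b : Int)) "down" := by
  decide

theorem pyja_key_up : ∀ a : Nat, a < 6 → ∀ b : Nat, b < 11 →
    updateSelected ((a : Int), (b : Int)) "up" = updateSelected_alt ((a : Int), (b : Int)) "up" := by
  decide

theorem pyja_key_right : ∀ a : Nat, a < 11 → ∀ b : Nat, b < 11 →
    updateSelected ((a : Int), (b : Int)) "right" = updateSelected_alt ((a : Int), (b : Int)) "right" := by
  decide

theorem pyja_key_left : ∀ a : Nat, a < 11 → ∀ b : Nat, b < 11 →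
    updateSelected ((a : Int), (b : Int)) "left" = updateSelected_alt ((a : Int), (b : Int)) "left" := by
  decide

-- ===== VERDICT (by name: the statement is the Claim_ definition above) =====
theorem updateSelected_spec : Claim_equal_updateSelected := by
  intro selected direction _hdom hpre
  obtain ⟨x, y⟩ := selected
  unfold Spec_updateSelected
  by_cases h1 : direction = "down"
  · subst h1
    obtain ⟨hx0, hx10, hy0, hy10, hx5⟩ := hpre (Or.inl rfl)
    have hx5' := hx5 (Or.inl rfl)
    have ex : x = ((x.toNat : Nat) : Int) := (Int.toNat_of_nonneg hx0).symm
    have ey : y = ((y.toNat : Nat) : Int) := (Int.toNat_of_nonneg hy0).symm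
    rw [ex, ey]
    exact pyja_key_down x.toNat (by omega) y.toNat (by omega)
  · by_cases h2 : direction = "up"
    · subst h2
      obtain ⟨hx0, hx10, hy0, hy10, hx5⟩ := hpre (Or.inr (Or.inl rfl))
      have hx5' := hx5 (Or.inr rfl)
      have ex : x = ((x.toNat : Nat) : Int) := (Int.toNat_of_nonneg hx0).symm
      have ey : y = ((y.toNat : Nat) : Int) := (Int.toNat_of_nonneg hy0).symm
      rw [ex, ey]
      exact pyja_key_up x.toNat (by omega) y.toNat (by omega)
    · by_cases h3 : direction = "right"
      · subst h3
        obtain ⟨hx0, hx10, hy0, hy10, _⟩ := hpre (Or.inr (Or.inr (Or.inl rfl)))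
        have ex : x = ((x.toNat : Nat) : Int) := (Int.toNat_of_nonneg hx0).symm
        have ey : y = ((y.toNat : Nat) : Int) := (Int.toNat_of_nonneg hy0).symm
        rw [ex, ey]
        exact pyja_key_right x.toNat (by omega) y.toNat (by omega)
      · by_cases h4 : direction = "left"
        · subst h4
          obtain ⟨hx0, hx10, hy0, hy10, _⟩ := hpre (Or.inr (Or.inr (Or.inr rfl)))
          have ex : x = ((x.toNat : Nat) : Int) := (Int.toNat_of_nonneg hx0).symm
          have ey : y = ((y.toNat : Nat) : Int) := (Int.toNat_of_nonneg hy0).symm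
          rw [ex, ey]
          exact pyja_key_left x.toNat (by omega) y.toNat (by omega)
        · simp [updateSelected, updateSelected_alt, h1, h2, h3, h4]
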